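-- pv_equiv track=rewrite | github.com/MananCoder29/Hack-Nation-Hackathon-2k26 | backend/src/agents/ranking_agent.py | _generate_packages
-- ===== SOURCE A (Python) =====
-- from typing import Dict, Any, List, Optional
-- import itertools
--
-- def _generate_packages(
--
--     grouped: Dict[str, List[Dict[str, Any]]]
-- ) -> List[Dict[str, Dict[str, Any]]]:
--     """Generate all combinations of packages (one item per category).
--
--     Args:
--         grouped: Items grouped by category
--
--     Returns:
--         List of package dictionaries (category -> item mapping)
--     """
--     categories = ["flights", "hotels", "meeting_rooms", "catering"]
--
--     # Get items for each category (use empty list if category missing)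
--     items_by_category = [grouped.get(cat, []) for cat in categories]
--
--     # Filter out empty categories
--     valid_categories = []
--     valid_items = []
--     for cat, items in zip(categories, items_by_category):
--         if items:
--             valid_categories.append(cat)
--             valid_items.append(items)
--
--     if not valid_items:
--         return []
--
--     packages = []
--     for combo in itertools.product(*valid_items):
--         pkg = {cat: item for cat, item in zip(valid_categories, combo)}
--         packages.append(pkg)
--
--     # Limit to top 50 packages for performance
--     return packages[:50]
-- ===== SOURCE B (Python) =====
-- def _generate_packages(grouped):
--     categories = ["flights", "hotels", "meeting_rooms", "catering"]
--     valid = [(c, grouped.get(c, [])) for c in categories if grouped.get(c, [])]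
--     if not valid:
--         return []
--     result = [{}]
--     for cat, items in valid:
--         result = [{**pkg, cat: item} for pkg in result for item in items][:50]
--     return result
-- ===== Notes on version B (the rewrite author's own statement) =====
-- stated objective: alternative
-- what changed: Instead of materializing the full itertools.product of all valid categories and slicing to 50 at the end, B folds over the valid (category, items) pairs, extending a running list of partial packages and truncating it to 50 after every category, so at most 50 partial packages are ever kept.
import Mathlib
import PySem

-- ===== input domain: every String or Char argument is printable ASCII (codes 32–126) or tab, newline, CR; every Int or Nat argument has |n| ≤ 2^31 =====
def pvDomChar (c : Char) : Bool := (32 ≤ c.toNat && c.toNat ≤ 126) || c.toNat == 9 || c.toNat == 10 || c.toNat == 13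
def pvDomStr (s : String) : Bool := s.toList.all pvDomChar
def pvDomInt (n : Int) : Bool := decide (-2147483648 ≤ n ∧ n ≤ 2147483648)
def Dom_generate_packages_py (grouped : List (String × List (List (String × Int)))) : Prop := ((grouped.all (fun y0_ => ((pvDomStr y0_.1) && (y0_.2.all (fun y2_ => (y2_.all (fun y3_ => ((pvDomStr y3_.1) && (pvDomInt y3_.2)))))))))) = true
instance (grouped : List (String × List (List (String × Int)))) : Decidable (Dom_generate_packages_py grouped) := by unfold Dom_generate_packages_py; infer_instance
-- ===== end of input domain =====

-- ===== PORT A =====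
-- B replaces the full-product-then-slice with a fold that truncates the running
-- package list to 50 after each category, so at most 50 partial packages are kept (objective: alternative).
-- itertools.product(*lists): leftmost factor varies slowest (exact port)
def pvProduct {a : Type} : List (List a) -> List (List a)
  | [] => [[]]
  | xs :: rest => xs.flatMap (fun x => (pvProduct rest).map (fun c => x :: c))

def generate_packages_py (grouped : List (String × List (List (String × Int)))) : List (List (String × List (String × Int))) :=
  let categories : List String := ["flights", "hotels", "meeting_rooms", "catering"]
  let items_by_category := categories.map (fun cat => (PySem.Dict.mk grouped).getD cat [])
  -- the for-loop accumulating valid_categories / valid_items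
  let valid := (categories.zip items_by_category).foldl
      (fun (acc : List String × List (List (List (String × Int)))) ci =>
        if ci.2 ≠ [] then (acc.1 ++ [ci.1], acc.2 ++ [ci.2]) else acc) ([], [])
  let valid_categories := valid.1
  let valid_items := valid.2
  if valid_items = [] then []
  else
    -- {cat: item for cat, item in zip(valid_categories, combo)}: the categories are
    -- pairwise-distinct string literals, so the dict is exactly the zip pair list (exact)
    let packages := (pvProduct valid_items).map (fun combo => valid_categories.zip combo)
    packages.take 50

-- ===== PORT B =====
def generate_packages_py_alt (grouped : List (String × List (List (String × Int)))) : List (List (String × List (String × Int))) :=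
  let categories : List String := ["flights", "hotels", "meeting_rooms", "catering"]
  let valid := (categories.map (fun cat => (cat, (PySem.Dict.mk grouped).getD cat []))).filter
      (fun p => !p.2.isEmpty)
  if valid.isEmpty then []
  else
    -- {**pkg, cat: item}: cat is a fresh key for pkg (each category handled once), so it appends (exact)
    valid.foldl
      (fun result p => (result.flatMap (fun pkg => p.2.map (fun item => pkg ++ [(p.1, item)]))).take 50)
      [[]]

-- ===== PRECONDITION & SPEC =====
def Spec_generate_packages_py (grouped : List (String × List (List (String × Int)))) (out : List (List (String × List (String × Int)))) : Prop := out = generate_packages_py_alt grouped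
instance (grouped : List (String × List (List (String × Int)))) (out : List (List (String × List (String × Int)))) : Decidable (Spec_generate_packages_py grouped out) := by unfold Spec_generate_packages_py; infer_instance

-- ===== CLAIM (what is proved, stated in full; the proofs are below) =====
def Claim_equal_generate_packages_py : Prop := ∀ (grouped : List (String × List (List (String × Int)))), Dom_generate_packages_py grouped → Spec_generate_packages_py grouped (generate_packages_py grouped)

-- ===== LEMMAS AND PROOFS =====

-- the valid_categories / valid_items accumulation loop is the filter of the pair list
theorem pv_acc_filter {α β : Type} (l : List (α × List β)) (acc1 : List α) (acc2 : List (List β)) :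
    l.foldl (fun acc ci => if ci.2 ≠ [] then (acc.1 ++ [ci.1], acc.2 ++ [ci.2]) else acc) (acc1, acc2)
      = (acc1 ++ (l.filter (fun p => !p.2.isEmpty)).map (·.1),
         acc2 ++ (l.filter (fun p => !p.2.isEmpty)).map (·.2)) := by
  induction l generalizing acc1 acc2 with
  | nil => simp
  | cons ci l ih =>
    rw [List.foldl_cons]
    by_cases h : ci.2 = []
    · rw [if_neg (by simp [h]), ih]
      simp [h]
    · rw [if_pos h, ih]
      simp [h]

theorem pv_zip_map_self {α β : Type} (l : List α) (g : α → β) :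
    l.zip (l.map g) = l.map (fun c => (c, g c)) := by
  induction l with
  | nil => rfl
  | cons x l ih => simp [ih]

-- a flatMap-fold distributes over its accumulator
theorem pv_foldl_flatMap_acc {α β : Type} (pairs : List α) (ext : α → β → List β) (acc : List β) :
    pairs.foldl (fun r p => r.flatMap (ext p)) acc
      = acc.flatMap (fun a => pairs.foldl (fun r p => r.flatMap (ext p)) [a]) := by
  induction pairs generalizing acc with
  | nil => simp
  | cons p pairs ih =>
    simp only [List.foldl_cons]
    rw [ih, List.flatMap_assoc]
    congr 1; funext a
    rw [← ih]
    simp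

-- the fold over (category, items) pairs builds exactly the mapped cartesian product
theorem pv_fold_eq_product (pairs : List (String × List (List (String × Int))))
    (pkg0 : List (String × List (String × Int))) :
    pairs.foldl (fun r p => r.flatMap (fun pkg => p.2.map (fun item => pkg ++ [(p.1, item)]))) [pkg0]
      = (pvProduct (pairs.map (·.2))).map (fun combo => pkg0 ++ (pairs.map (·.1)).zip combo) := by
  induction pairs generalizing pkg0 with
  | nil => simp [pvProduct]
  | cons p pairs ih =>
    obtain ⟨c, its⟩ := p
    simp only [List.foldl_cons, pvProduct, List.map_cons]
    rw [pv_foldl_flatMap_acc]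
    simp only [List.flatMap_singleton, List.map_flatMap, List.flatMap_map, ih, List.map_map,
      Function.comp_def, List.zip_cons_cons]
    simp [List.append_assoc]

-- truncating the source before a nonempty-valued flatMap does not change a short prefix
theorem pv_take_flatMap {β : Type} (f : β → List β) (hf : ∀ p, f p ≠ []) :
    ∀ (r : List β) (n k : Nat), k ≤ n →
      ((r.take n).flatMap f).take k = (r.flatMap f).take k := by
  intro r
  induction r with
  | nil => simp
  | cons x r ih =>
    intro n k hk
    cases n with
    | zero => interval_cases k; simp
    | succ m =>
      simp only [List.take_succ_cons, List.flatMap_cons]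
      rw [List.take_append, List.take_append]
      have hx : 1 ≤ (f x).length := by
        have := hf x
        cases hfx : f x with
        | nil => exact absurd hfx this
        | cons a b => simp
      rw [ih m (k - (f x).length) (by omega)]

-- truncating to 50 after each category equals truncating the full fold once
theorem pv_fold_take (pairs : List (String × List (List (String × Int)))) :
    (∀ p ∈ pairs, p.2 ≠ []) →
    ∀ (r : List (List (String × List (String × Int)))),
      pairs.foldl (fun res p => (res.flatMap (fun pkg => p.2.map (fun item => pkg ++ [(p.1, item)]))).take 50) (r.take 50)
        = (pairs.foldl (fun res p => res.flatMap (fun pkg => p.2.map (fun item => pkg ++ [(p.1, item)]))) r).take 50 := by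
  induction pairs with
  | nil => intro _ r; simp
  | cons p pairs ih =>
    intro hne r
    simp only [List.foldl_cons]
    have hf : ∀ pkg : List (String × List (String × Int)),
        p.2.map (fun item => pkg ++ [(p.1, item)]) ≠ [] := by
      intro pkg
      simp only [ne_eq, List.map_eq_nil_iff]
      exact hne p (by simp)
    rw [pv_take_flatMap _ hf r 50 50 (le_refl 50)]
    rw [← ih (fun q hq => hne q (by simp [hq]))
        (r.flatMap (fun pkg => p.2.map (fun item => pkg ++ [(p.1, item)])))]

-- ===== VERDICT (by name: the statement is the Claim_ definition above) =====
theorem generate_packages_py_spec : Claim_equal_generate_packages_py := by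
  intro grouped _dom
  unfold Spec_generate_packages_py generate_packages_py generate_packages_py_alt
  simp only [pv_zip_map_self, pv_acc_filter, List.nil_append]
  set filt := ((["flights", "hotels", "meeting_rooms", "catering"].map
      (fun cat => (cat, (PySem.Dict.mk grouped).getD cat []))).filter (fun p => !p.2.isEmpty)) with hfilt
  by_cases hE : filt = []
  · simp [hE]
  · have hE' : filt.isEmpty = false := by simp [hE]
    have hmapne : filt.map (·.2) ≠ [] := by simp [hE]
    simp only [hmapne, hE', Bool.false_eq_true, if_false]
    have hne : ∀ p ∈ filt, p.2 ≠ [] := by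
      intro p hp
      have := List.of_mem_filter hp
      simpa using this
    have h0 : ([[]] : List (List (String × List (String × Int)))) = ([[]] : List (List (String × List (String × Int)))).take 50 := rfl
    rw [h0, pv_fold_take filt hne, pv_fold_eq_product]
    simp
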